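-- pv_equiv track=rewrite | github.com/Chochanguk/codetree-TILs | 250405/왕실의 기사 대결/royal-knight-duel.py | update_k_board
-- ===== SOURCE A (Python) =====
-- def update_k_board(L,k_pos):
--     k_board=[[0]*L for _ in range(L)]
--
--     for key, values in k_pos.items():
--         (sx, sy), (ex, ey) = values
--         for i in range(sx,ex+1):
--             for j in range(sy,ey+1):
--                 k_board[i][j]=key
--     return k_board
-- ===== SOURCE B (Python) =====
-- def update_k_board(L, k_pos):
--     # Two-phase: bucket each knight's clamped in-board column segment into every row
--     # it covers, then build each row by splicing its segments in knight order
--     # (last writer wins).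
--     segs = [[] for _ in range(L)]
--     for key, ((sx, sy), (ex, ey)) in k_pos.items():
--         lo, hi = max(sy, 0), min(ey, L - 1)
--         if lo <= hi:
--             for i in range(max(sx, 0), min(ex, L - 1) + 1):
--                 segs[i].append((key, lo, hi))
--     board = []
--     for i in range(L):
--         row = [0] * L
--         for key, lo, hi in segs[i]:
--             row[lo:hi + 1] = [key] * (hi + 1 - lo)
--         board.append(row)
--     return board
-- ===== Notes on version B (the rewrite author's own statement) =====
-- stated objective: alternative
-- what changed: B buckets each knight's clamped column segment into the rows it covers and then builds the board row by row, splicing the segments of each row in knight order (last writer wins), instead of A's knight-major per-cell writes into a mutable board.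
-- outside the precondition, e.g. on update_k_board(1, {3: ((-1, 0), (-1, 0))}): A returns [[3]], B returns [[0]]; on update_k_board(2, {5: ((0, -1), (1, 0))}): A returns [[5, 5], [5, 5]], B returns [[5, 0], [5, 0]]
import Mathlib
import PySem

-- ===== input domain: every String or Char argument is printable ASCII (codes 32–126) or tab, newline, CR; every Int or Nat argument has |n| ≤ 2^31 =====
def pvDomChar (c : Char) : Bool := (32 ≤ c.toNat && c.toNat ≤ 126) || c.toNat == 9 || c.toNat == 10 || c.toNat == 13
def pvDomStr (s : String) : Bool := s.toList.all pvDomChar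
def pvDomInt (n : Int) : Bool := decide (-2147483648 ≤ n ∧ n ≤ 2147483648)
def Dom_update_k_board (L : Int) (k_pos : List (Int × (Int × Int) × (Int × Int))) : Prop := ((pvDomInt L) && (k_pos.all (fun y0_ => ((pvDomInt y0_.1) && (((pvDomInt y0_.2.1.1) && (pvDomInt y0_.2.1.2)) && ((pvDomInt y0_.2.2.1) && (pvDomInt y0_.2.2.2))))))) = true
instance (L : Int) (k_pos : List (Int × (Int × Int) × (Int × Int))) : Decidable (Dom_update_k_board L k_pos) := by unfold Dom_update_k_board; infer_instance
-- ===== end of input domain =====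

-- B buckets each knight's clamped column segment into the rows it covers and then builds the
-- board row by row by splicing those segments in knight order, instead of A's knight-major
-- per-cell writes into a mutable board (alternative decomposition, same cost class).

-- ===== PORT A =====
-- k_board[i][j] = key : read the row, set the column, set the row back
-- (kv.1 = key, kv.2.1 = (sx, sy), kv.2.2 = (ex, ey))
def pvSetCell (b : List (List Int)) (i j key : Int) : List (List Int) :=
  PySem.List.pySetD b i (PySem.List.pySetD (PySem.List.pyGetD b i []) j key)

def update_k_board (L : Int) (k_pos : List (Int × (Int × Int) × (Int × Int))) : List (List Int) :=
  let k_board : List (List Int) := List.replicate L.toNat (List.replicate L.toNat 0)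
  ((PySem.Dict.ofList k_pos).items).foldl (fun b kv =>
    (PySem.List.pyRange kv.2.1.1 (kv.2.2.1+1) 1).foldl (fun b i =>
      (PySem.List.pyRange kv.2.1.2 (kv.2.2.2+1) 1).foldl (fun b j => pvSetCell b i j kv.1) b) b) k_board

-- ===== PORT B =====
-- Source B phase 1 body: `lo, hi = max(sy, 0), min(ey, L - 1); if lo <= hi:
-- for i in range(max(sx, 0), min(ex, L - 1) + 1): segs[i].append((key, lo, hi))`
-- (the indices i are always in [0, L), so plain set/getD is exact)
def pvBucketRow (L : Int) (kv : Int × (Int × Int) × (Int × Int))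
    (segs : List (List (Int × Int × Int))) : List (List (Int × Int × Int)) :=
  let lo := max kv.2.1.2 0
  let hi := min kv.2.2.2 (L - 1)
  if lo ≤ hi then
    (PySem.List.pyRange (max kv.2.1.1 0) (min kv.2.2.1 (L - 1) + 1) 1).foldl
      (fun segs i => segs.set i.toNat ((segs.getD i.toNat []) ++ [(kv.1, lo, hi)])) segs
  else segs

-- Source B phase 2 body: `row[lo:hi+1] = [key] * (hi + 1 - lo)`; the slice assignment is exact as
-- take/replicate/drop because every bucketed segment has 0 ≤ lo ≤ hi ≤ L-1 = len(row)-1 and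
-- the replacement list has exactly the slice length.
def pvSplice (row : List Int) (s : Int × Int × Int) : List Int :=
  row.take s.2.1.toNat ++ List.replicate (s.2.2 + 1 - s.2.1).toNat s.1 ++ row.drop (s.2.2 + 1).toNat

def update_k_board_alt (L : Int) (k_pos : List (Int × (Int × Int) × (Int × Int))) : List (List Int) :=
  let items := (PySem.Dict.ofList k_pos).items
  let segs := items.foldl (fun segs kv => pvBucketRow L kv segs)
    (List.replicate L.toNat ([] : List (Int × Int × Int)))
  (PySem.List.pyRange 0 L 1).map (fun i =>
    (segs.getD i.toNat []).foldl (fun row s => pvSplice row s) (List.replicate L.toNat 0))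

-- ===== PRECONDITION & SPEC =====
-- Pre_ requires every knight's non-empty rectangle to lie inside the board [0,L)×[0,L).
-- Beyond the inputs on which A raises IndexError (an index outside [-L, L)), this also
-- excludes inputs where a non-empty rectangle starts at a negative coordinate within [-L, 0):
-- there A returns a board in which Python's negative-index wraparound has painted the
-- opposite edge of the board — an artefact of A's indexing that B does not reproduce
-- (B paints only the in-board part of the rectangle).
def Pre_update_k_board (L : Int) (k_pos : List (Int × (Int × Int) × (Int × Int))) : Prop :=
  ∀ kv ∈ (PySem.Dict.ofList k_pos).items,
    (kv.2.1.1 ≤ kv.2.2.1 ∧ kv.2.1.2 ≤ kv.2.2.2) →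
    (0 ≤ kv.2.1.1 ∧ kv.2.2.1 < L ∧ 0 ≤ kv.2.1.2 ∧ kv.2.2.2 < L)
instance (L : Int) (k_pos : List (Int × (Int × Int) × (Int × Int))) : Decidable (Pre_update_k_board L k_pos) := by unfold Pre_update_k_board; infer_instance

def pvWitness_update_k_board : Int × (List (Int × (Int × Int) × (Int × Int))) :=
  (3, [(1, ((0,0),(1,1))), (2, ((1,1),(2,2)))])

def Spec_update_k_board (L : Int) (k_pos : List (Int × (Int × Int) × (Int × Int))) (out : List (List Int)) : Prop := out = update_k_board_alt L k_pos
instance (L : Int) (k_pos : List (Int × (Int × Int) × (Int × Int))) (out : List (List Int)) : Decidable (Spec_update_k_board L k_pos out) := by unfold Spec_update_k_board; infer_instance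

-- ===== CLAIM (what is proved, stated in full; the proofs are below) =====
def Claim_equal_update_k_board : Prop := ∀ (L : Int) (k_pos : List (Int × (Int × Int) × (Int × Int))), Dom_update_k_board L k_pos → Pre_update_k_board L k_pos → Spec_update_k_board L k_pos (update_k_board L k_pos)

-- ===== LEMMAS AND PROOFS =====
def pvShape (L : Int) (b : List (List Int)) : Prop :=
  b.length = L.toNat ∧ ∀ r ∈ b, r.length = L.toNat
def pvGet2 (b : List (List Int)) (i j : Nat) : Int := (b.getD i []).getD j 0

theorem pv_row_len (L : Int) (b : List (List Int)) (hb : pvShape L b)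
    (n : Nat) (hn : n < b.length) : (b.getD n []).length = L.toNat := by
  obtain ⟨hlen, hrows⟩ := hb
  have hm : b[n] ∈ b := List.getElem_mem hn
  have := hrows _ hm
  rw [List.getD_eq_getElem?_getD, List.getElem?_eq_getElem hn]
  simpa using this

theorem pv_get2_set (L : Int) (b : List (List Int)) (hb : pvShape L b)
    (i j : Int) (hi0 : 0 ≤ i) (hiL : i < L) (hj0 : 0 ≤ j) (hjL : j < L)
    (key : Int) (i0 j0 : Nat) :
    pvGet2 (pvSetCell b i j key) i0 j0 =
      if i0 = i.toNat ∧ j0 = j.toNat then key else pvGet2 b i0 j0 := by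
  have hlen := hb.1
  have hiN : i.toNat < b.length := by omega
  have hrow := pv_row_len L b hb i.toNat hiN
  have hjN : j.toNat < (b.getD i.toNat []).length := by omega
  have hrows := hb.2
  rw [List.getD_eq_getElem?_getD] at hjN
  unfold pvSetCell pvGet2
  rw [PySem.List.pySetD_of_nonneg _ _ hi0, PySem.List.pySetD_of_nonneg _ _ hj0,
      PySem.List.pyGetD_of_nonneg _ _ hi0]
  simp only [List.getD_eq_getElem?_getD, List.getElem?_set]
  by_cases h1 : i0 = i.toNat
  · subst h1
    simp only [if_pos rfl, if_pos hiN, Option.getD_some]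
    by_cases h2 : j0 = j.toNat
    · subst h2; simp [hjN]
    · have h2' : ¬ (j.toNat = j0) := fun h => h2 h.symm
      simp [h2, h2']
  · have h1' : ¬ (i.toNat = i0) := fun h => h1 h.symm
    simp [h1, h1']

theorem pv_shape_set (L : Int) (b : List (List Int)) (hb : pvShape L b)
    (i j : Int) (hi0 : 0 ≤ i) (hiL : i < L) (hj0 : 0 ≤ j) (hjL : j < L)
    (key : Int) : pvShape L (pvSetCell b i j key) := by
  have hlen := hb.1
  have hiN : i.toNat < b.length := by omega
  have hrow := pv_row_len L b hb i.toNat hiN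
  have hrows := hb.2
  rw [pvSetCell, PySem.List.pySetD_of_nonneg _ _ hi0]
  refine ⟨by simpa using hlen, ?_⟩
  intro r hr
  rcases List.mem_or_eq_of_mem_set hr with h | h
  · exact hrows _ h
  · subst h
    rw [PySem.List.pySetD_of_nonneg _ _ hj0, PySem.List.pyGetD_of_nonneg _ _ hi0]
    simpa using hrow

theorem pv_cols (L i key : Int) (hi0 : 0 ≤ i) (hiL : i < L) :
    ∀ (js : List Int), (∀ j ∈ js, 0 ≤ j ∧ j < L) → ∀ b, pvShape L b →
    pvShape L (js.foldl (fun b j => pvSetCell b i j key) b) ∧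
    ∀ i0 j0 : Nat, pvGet2 (js.foldl (fun b j => pvSetCell b i j key) b) i0 j0 =
      if i0 = i.toNat ∧ (↑j0 : Int) ∈ js then key else pvGet2 b i0 j0 := by
  intro js
  induction js with
  | nil => intro _ b hb; simp [hb]
  | cons j js ih =>
    intro hjs b hb
    have hj := hjs j (List.mem_cons_self)
    have hb' := pv_shape_set L b hb i j hi0 hiL hj.1 hj.2 key
    obtain ⟨hs, hg⟩ := ih (fun x hx => hjs x (List.mem_cons_of_mem _ hx)) _ hb'
    simp only [List.foldl_cons]
    refine ⟨hs, ?_⟩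
    intro i0 j0
    rw [hg, pv_get2_set L b hb i j hi0 hiL hj.1 hj.2 key]
    simp only [List.mem_cons]
    have hjj : ((↑j0 : Int) = j) ↔ j0 = j.toNat := by omega
    split_ifs <;> tauto

theorem pv_rows (L key : Int) (js : List Int) (hjs : ∀ j ∈ js, 0 ≤ j ∧ j < L) :
    ∀ (is : List Int), (∀ i ∈ is, 0 ≤ i ∧ i < L) → ∀ b, pvShape L b →
    pvShape L (is.foldl (fun b i => js.foldl (fun b j => pvSetCell b i j key) b) b) ∧
    ∀ i0 j0 : Nat, pvGet2 (is.foldl (fun b i => js.foldl (fun b j => pvSetCell b i j key) b) b) i0 j0 =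
      if (↑i0 : Int) ∈ is ∧ (↑j0 : Int) ∈ js then key else pvGet2 b i0 j0 := by
  intro is
  induction is with
  | nil => intro _ b hb; simp [hb]
  | cons i is ih =>
    intro his b hb
    have hi := his i (List.mem_cons_self)
    obtain ⟨hs1, hg1⟩ := pv_cols L i key hi.1 hi.2 js hjs b hb
    obtain ⟨hs, hg⟩ := ih (fun x hx => his x (List.mem_cons_of_mem _ hx)) _ hs1
    simp only [List.foldl_cons]
    refine ⟨hs, ?_⟩
    intro i0 j0
    rw [hg, hg1]
    simp only [List.mem_cons]
    have hii : ((↑i0 : Int) = i) ↔ i0 = i.toNat := by omega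
    split_ifs <;> tauto

theorem pv_foldl_id (is : List Int) (b : List (List Int)) :
    is.foldl (fun b _ => b) b = b := by
  induction is generalizing b <;> simp_all

theorem pv_rect (L : Int) (kv : Int × (Int × Int) × (Int × Int))
    (hkv : (kv.2.1.1 ≤ kv.2.2.1 ∧ kv.2.1.2 ≤ kv.2.2.2) →
      0 ≤ kv.2.1.1 ∧ kv.2.2.1 < L ∧ 0 ≤ kv.2.1.2 ∧ kv.2.2.2 < L)
    (b : List (List Int)) (hb : pvShape L b) :
    pvShape L ((PySem.List.pyRange kv.2.1.1 (kv.2.2.1+1) 1).foldl (fun b i =>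
        (PySem.List.pyRange kv.2.1.2 (kv.2.2.2+1) 1).foldl (fun b j => pvSetCell b i j kv.1) b) b) ∧
    ∀ i0 j0 : Nat, pvGet2 ((PySem.List.pyRange kv.2.1.1 (kv.2.2.1+1) 1).foldl (fun b i =>
        (PySem.List.pyRange kv.2.1.2 (kv.2.2.2+1) 1).foldl (fun b j => pvSetCell b i j kv.1) b) b) i0 j0 =
      if kv.2.1.1 ≤ (i0 : Int) ∧ (i0 : Int) ≤ kv.2.2.1 ∧ kv.2.1.2 ≤ (j0 : Int) ∧ (j0 : Int) ≤ kv.2.2.2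
      then kv.1 else pvGet2 b i0 j0 := by
  obtain ⟨key, ⟨sx, sy⟩, ex, ey⟩ := kv
  simp only at hkv ⊢
  by_cases hx : sx ≤ ex
  · by_cases hy : sy ≤ ey
    · obtain ⟨h1, h2, h3, h4⟩ := hkv ⟨hx, hy⟩
      obtain ⟨hs, hg⟩ := pv_rows L key (PySem.List.pyRange sy (ey+1) 1)
        (fun j hj => by rw [PySem.List.mem_pyRange_one] at hj; omega)
        (PySem.List.pyRange sx (ex+1) 1)
        (fun i hi => by rw [PySem.List.mem_pyRange_one] at hi; omega) b hb
      refine ⟨hs, ?_⟩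
      intro i0 j0
      rw [hg]
      simp only [PySem.List.mem_pyRange_one]
      split_ifs with c1 c2 <;> first | rfl | omega
    · rw [PySem.List.pyRange_one_eq_nil (by omega : ey + 1 ≤ sy)]
      have : ∀ (is : List Int) (b : List (List Int)),
          is.foldl (fun b i => List.foldl (fun b j => pvSetCell b i j key) b []) b = b :=
        fun is b => pv_foldl_id is b
      rw [this]
      refine ⟨hb, ?_⟩
      intro i0 j0
      rw [if_neg (by omega)]
  · rw [PySem.List.pyRange_one_eq_nil (by omega : ex + 1 ≤ sx)]
    refine ⟨hb, ?_⟩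
    intro i0 j0
    simp only [List.foldl_nil]
    rw [if_neg (by omega)]

def pvPred (i0 j0 : Nat) (kv : Int × (Int × Int) × (Int × Int)) : Bool :=
  decide (kv.2.1.1 ≤ (i0 : Int) ∧ (i0 : Int) ≤ kv.2.2.1 ∧ kv.2.1.2 ≤ (j0 : Int) ∧ (j0 : Int) ≤ kv.2.2.2)

theorem pv_items (L : Int) :
    ∀ (items : List (Int × (Int × Int) × (Int × Int))),
    (∀ kv ∈ items, (kv.2.1.1 ≤ kv.2.2.1 ∧ kv.2.1.2 ≤ kv.2.2.2) →
      0 ≤ kv.2.1.1 ∧ kv.2.2.1 < L ∧ 0 ≤ kv.2.1.2 ∧ kv.2.2.2 < L) →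
    ∀ b, pvShape L b →
    pvShape L (items.foldl (fun b kv => (PySem.List.pyRange kv.2.1.1 (kv.2.2.1+1) 1).foldl (fun b i =>
        (PySem.List.pyRange kv.2.1.2 (kv.2.2.2+1) 1).foldl (fun b j => pvSetCell b i j kv.1) b) b) b) ∧
    ∀ i0 j0 : Nat,
      pvGet2 (items.foldl (fun b kv => (PySem.List.pyRange kv.2.1.1 (kv.2.2.1+1) 1).foldl (fun b i =>
        (PySem.List.pyRange kv.2.1.2 (kv.2.2.2+1) 1).foldl (fun b j => pvSetCell b i j kv.1) b) b) b) i0 j0 =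
      match items.reverse.find? (pvPred i0 j0) with
      | some kv => kv.1
      | none => pvGet2 b i0 j0 := by
  intro items
  induction items with
  | nil => intro _ b hb; simp [hb]
  | cons kv items ih =>
    intro hs b hb
    obtain ⟨hs1, hg1⟩ := pv_rect L kv (hs kv List.mem_cons_self) b hb
    obtain ⟨hsh, hg⟩ := ih (fun x hx => hs x (List.mem_cons_of_mem _ hx)) _ hs1
    simp only [List.foldl_cons]
    refine ⟨hsh, ?_⟩
    intro i0 j0
    rw [hg]
    rw [List.reverse_cons, List.find?_append]
    rcases h : items.reverse.find? (pvPred i0 j0) with _ | kv'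
    · simp only [Option.or_none, Option.none_or]
      rw [hg1]
      by_cases hp : kv.2.1.1 ≤ (i0 : Int) ∧ (i0 : Int) ≤ kv.2.2.1 ∧ kv.2.1.2 ≤ (j0 : Int) ∧ (j0 : Int) ≤ kv.2.2.2
      · rw [if_pos hp]
        simp [pvPred, hp]
      · rw [if_neg hp]
        simp [pvPred, hp]
    · simp

theorem pv_shape_init (L : Int) :
    pvShape L (List.replicate L.toNat (List.replicate L.toNat (0:Int))) := by
  refine ⟨by simp, ?_⟩
  intro r hr
  rw [List.eq_of_mem_replicate hr]
  simp

theorem pv_get2_init (L : Int) (i0 j0 : Nat) :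
    pvGet2 (List.replicate L.toNat (List.replicate L.toNat (0:Int))) i0 j0 = 0 := by
  unfold pvGet2
  by_cases h : i0 < L.toNat <;> by_cases h2 : j0 < L.toNat <;>
    simp [List.getD_eq_getElem?_getD, List.getElem?_replicate, h, h2]

theorem pv_get2_eq (b : List (List Int)) (i0 j0 : Nat) (h1 : i0 < b.length)
    (h2 : j0 < (b[i0]'h1).length) : (b[i0]'h1)[j0]'h2 = pvGet2 b i0 j0 := by
  unfold pvGet2
  rw [List.getD_eq_getElem?_getD (l := b), List.getElem?_eq_getElem h1, Option.getD_some,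
      List.getD_eq_getElem?_getD, List.getElem?_eq_getElem h2, Option.getD_some]

def pvQ (L : Int) (i0 : Nat) (kv : Int × (Int × Int) × (Int × Int)) : Bool :=
  decide (max kv.2.1.2 0 ≤ min kv.2.2.2 (L - 1) ∧
    max kv.2.1.1 0 ≤ (i0 : Int) ∧ (i0 : Int) ≤ min kv.2.2.1 (L - 1))

def pvG (L : Int) (kv : Int × (Int × Int) × (Int × Int)) : Int × Int × Int :=
  (kv.1, max kv.2.1.2 0, min kv.2.2.2 (L - 1))

theorem pv_setapp (L : Int) (acc : List (List (Int × Int × Int))) (hlen : acc.length = L.toNat)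
    (j : Int) (hj0 : 0 ≤ j) (hjL : j < L) (seg : Int × Int × Int) :
    (acc.set j.toNat ((acc.getD j.toNat []) ++ [seg])).length = L.toNat ∧
    ∀ i0 : Nat, (acc.set j.toNat ((acc.getD j.toNat []) ++ [seg])).getD i0 [] =
      acc.getD i0 [] ++ (if (i0 : Int) = j then [seg] else []) := by
  refine ⟨by simpa using hlen, ?_⟩
  intro i0
  have hjN : j.toNat < acc.length := by omega
  by_cases h : i0 = j.toNat
  · subst h
    rw [List.getD_eq_getElem?_getD (l := acc.set _ _), List.getElem?_set_self]
    · simp only [Option.getD_some]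
      rw [if_pos (by omega)]
    · exact hjN
  · rw [List.getD_eq_getElem?_getD (l := acc.set _ _), List.getElem?_set_ne (fun hh => h hh.symm),
      ← List.getD_eq_getElem?_getD, if_neg (by omega), List.append_nil]

theorem pv_bucket_range (L : Int) (seg : Int × Int × Int) :
    ∀ (js : List Int), (∀ j ∈ js, 0 ≤ j ∧ j < L) → js.Nodup →
    ∀ acc : List (List (Int × Int × Int)), acc.length = L.toNat →
    (js.foldl (fun segs i => segs.set i.toNat ((segs.getD i.toNat []) ++ [seg])) acc).length = L.toNat ∧
    ∀ i0 : Nat,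
      (js.foldl (fun segs i => segs.set i.toNat ((segs.getD i.toNat []) ++ [seg])) acc).getD i0 [] =
      acc.getD i0 [] ++ (if (i0 : Int) ∈ js then [seg] else []) := by
  intro js
  induction js with
  | nil => intro _ _ acc hlen; exact ⟨hlen, fun i0 => by simp⟩
  | cons j js ih =>
    intro hjs hnd acc hlen
    have hj := hjs j List.mem_cons_self
    obtain ⟨hl1, hg1⟩ := pv_setapp L acc hlen j hj.1 hj.2 seg
    obtain ⟨hl, hg⟩ := ih (fun x hx => hjs x (List.mem_cons_of_mem _ hx))
      (List.nodup_cons.1 hnd).2 _ hl1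
    simp only [List.foldl_cons]
    refine ⟨hl, ?_⟩
    intro i0
    rw [hg i0, hg1 i0, List.append_assoc]
    simp only [List.mem_cons]
    by_cases h1 : (i0 : Int) = j
    · have hnotin : (i0 : Int) ∉ js := by rw [h1]; exact (List.nodup_cons.1 hnd).1
      rw [if_pos h1, if_neg hnotin, if_pos (Or.inl h1)]
      rfl
    · rw [if_neg h1]
      by_cases h2 : (i0 : Int) ∈ js
      · rw [if_pos h2, if_pos (Or.inr h2)]
        rfl
      · rw [if_neg h2, if_neg (by tauto)]
        rfl

theorem pv_bucket_step (L : Int) (kv : Int × (Int × Int) × (Int × Int))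
    (acc : List (List (Int × Int × Int))) (hlen : acc.length = L.toNat) :
    (pvBucketRow L kv acc).length = L.toNat ∧
    ∀ i0 : Nat, (pvBucketRow L kv acc).getD i0 [] =
      acc.getD i0 [] ++ (if pvQ L i0 kv then [pvG L kv] else []) := by
  obtain ⟨key, ⟨sx, sy⟩, ex, ey⟩ := kv
  unfold pvBucketRow pvQ pvG
  simp only
  by_cases hlh : max sy 0 ≤ min ey (L - 1)
  · rw [if_pos hlh]
    obtain ⟨hl, hg⟩ := pv_bucket_range L (key, max sy 0, min ey (L - 1))
      (PySem.List.pyRange (max sx 0) (min ex (L - 1) + 1) 1)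
      (fun j hj => by rw [PySem.List.mem_pyRange_one] at hj; omega)
      (PySem.List.nodup_pyRange_one _ _) acc hlen
    refine ⟨hl, ?_⟩
    intro i0
    rw [hg i0]
    simp only [PySem.List.mem_pyRange_one]
    by_cases hc : max sx 0 ≤ (i0 : Int) ∧ (i0 : Int) < min ex (L - 1) + 1
    · rw [if_pos hc, if_pos (by simp only [decide_eq_true_eq]; omega)]
    · rw [if_neg hc, if_neg (by simp only [decide_eq_true_eq]; omega)]
  · rw [if_neg hlh]
    refine ⟨hlen, ?_⟩
    intro i0
    rw [if_neg (by simp only [decide_eq_true_eq]; omega), List.append_nil]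

theorem pv_bucket_all (L : Int) (i0 : Nat) :
    ∀ (items : List (Int × (Int × Int) × (Int × Int))),
    ∀ acc : List (List (Int × Int × Int)), acc.length = L.toNat →
    (items.foldl (fun segs kv => pvBucketRow L kv segs) acc).length = L.toNat ∧
    (items.foldl (fun segs kv => pvBucketRow L kv segs) acc).getD i0 [] =
      acc.getD i0 [] ++ (items.filter (pvQ L i0)).map (pvG L) := by
  intro items
  induction items with
  | nil => intro acc hlen; exact ⟨hlen, by simp⟩
  | cons kv items ih =>
    intro acc hlen
    obtain ⟨hl1, hg1⟩ := pv_bucket_step L kv acc hlen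
    obtain ⟨hl, hg⟩ := ih _ hl1
    simp only [List.foldl_cons]
    refine ⟨hl, ?_⟩
    rw [hg, hg1 i0, List.append_assoc, List.filter_cons]
    by_cases hq : pvQ L i0 kv
    · rw [if_pos hq]
      simp [hq]
    · rw [if_neg hq]
      simp [hq]

theorem pv_splice (L : Int) (s : Int × Int × Int) (hs : 0 ≤ s.2.1 ∧ s.2.1 ≤ s.2.2 ∧ s.2.2 < L)
    (row : List Int) (hlen : row.length = L.toNat) :
    (pvSplice row s).length = L.toNat ∧
    ∀ j0 : Nat, j0 < L.toNat →
      (pvSplice row s).getD j0 0 =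
        if s.2.1 ≤ (j0 : Int) ∧ (j0 : Int) ≤ s.2.2 then s.1 else row.getD j0 0 := by
  obtain ⟨key, lo, hi⟩ := s
  simp only at hs ⊢
  unfold pvSplice
  simp only
  have htake : (row.take lo.toNat).length = lo.toNat := by
    rw [List.length_take]; omega
  have hTR : (row.take lo.toNat ++ List.replicate (hi + 1 - lo).toNat key).length
      = (hi + 1).toNat := by
    simp only [List.length_append, htake, List.length_replicate]; omega
  constructor
  · simp only [List.length_append, List.length_take, List.length_replicate, List.length_drop]
    omega
  · intro j0 hj0
    by_cases h1 : j0 < lo.toNat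
    · rw [List.getD_append _ _ _ _ (by omega), List.getD_append _ _ _ _ (by omega),
          List.getD_eq_getElem?_getD, List.getElem?_take_of_lt (by omega),
          ← List.getD_eq_getElem?_getD, if_neg (by omega)]
    · by_cases h2 : (j0 : Int) ≤ hi
      · rw [List.getD_append _ _ _ _ (by omega),
            List.getD_append_right _ _ _ _ (by omega), htake,
            List.getD_replicate _ (by omega), if_pos (by omega)]
      · rw [List.getD_append_right _ _ _ _ (by omega), hTR,
            List.getD_eq_getElem?_getD, List.getElem?_drop]
        have hidx : (hi + 1).toNat + (j0 - (hi + 1).toNat) = j0 := by omega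
        rw [hidx, ← List.getD_eq_getElem?_getD, if_neg (by omega)]

theorem pv_rowfold2 (L : Int) (j0 : Nat) (hj0 : j0 < L.toNat) :
    ∀ (segs : List (Int × Int × Int)),
    (∀ s ∈ segs, 0 ≤ s.2.1 ∧ s.2.1 ≤ s.2.2 ∧ s.2.2 < L) →
    ∀ row : List Int, row.length = L.toNat →
    (segs.foldl (fun row s => pvSplice row s) row).length = L.toNat ∧
    (segs.foldl (fun row s => pvSplice row s) row).getD j0 0 =
      match segs.reverse.find? (fun s => decide (s.2.1 ≤ (j0 : Int) ∧ (j0 : Int) ≤ s.2.2)) with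
      | some s => s.1
      | none => row.getD j0 0 := by
  intro segs
  induction segs with
  | nil => intro _ row hlen; exact ⟨hlen, rfl⟩
  | cons s segs ih =>
    intro hinv row hlen
    obtain ⟨hl1, hg1⟩ := pv_splice L s (hinv s List.mem_cons_self) row hlen
    obtain ⟨hl, hg⟩ := ih (fun x hx => hinv x (List.mem_cons_of_mem _ hx)) _ hl1
    simp only [List.foldl_cons]
    refine ⟨hl, ?_⟩
    rw [hg, List.reverse_cons, List.find?_append]
    rcases h : segs.reverse.find? (fun s => decide (s.2.1 ≤ (j0 : Int) ∧ (j0 : Int) ≤ s.2.2)) with _ | s'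
    · rw [h]
      simp only [Option.none_or]
      rw [hg1 j0 hj0]
      by_cases hp : s.2.1 ≤ (j0 : Int) ∧ (j0 : Int) ≤ s.2.2
      · rw [if_pos hp]
        simp [hp]
      · rw [if_neg hp]
        simp [hp]
    · rw [h]
      simp


theorem pv_segs_inv (L : Int) (i0 : Nat) (items : List (Int × (Int × Int) × (Int × Int))) :
    ∀ s ∈ (items.filter (pvQ L i0)).map (pvG L), 0 ≤ s.2.1 ∧ s.2.1 ≤ s.2.2 ∧ s.2.2 < L := by
  intro s hs
  simp only [List.mem_map, List.mem_filter] at hs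
  obtain ⟨kv, ⟨_, hq⟩, rfl⟩ := hs
  obtain ⟨key, ⟨sx, sy⟩, ex, ey⟩ := kv
  unfold pvQ at hq
  unfold pvG
  simp only [decide_eq_true_eq] at hq
  simp only at hq ⊢
  exact ⟨by omega, by omega, by omega⟩

theorem pv_find_eq (L : Int) (i0 j0 : Nat) (hi0 : i0 < L.toNat) (hj0 : j0 < L.toNat)
    (items : List (Int × (Int × Int) × (Int × Int))) :
    ((items.filter (pvQ L i0)).map (pvG L)).reverse.find?
        (fun s => decide (s.2.1 ≤ (j0 : Int) ∧ (j0 : Int) ≤ s.2.2)) =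
      (items.reverse.find? (pvPred i0 j0)).map (pvG L) := by
  rw [← List.map_reverse, List.find?_map, ← List.filter_reverse, List.find?_filter]
  congr 1
  congr 1
  funext kv
  obtain ⟨key, ⟨sx, sy⟩, ex, ey⟩ := kv
  unfold pvQ pvG pvPred
  simp only [Function.comp_apply, decide_eq_true_eq]
  apply decide_eq_decide.mpr
  constructor <;> intro h <;> omega

theorem pv_getD_elem (xs : List Int) (j0 : Nat) (h : j0 < xs.length) :
    xs.getD j0 0 = xs[j0]'h := by
  rw [List.getD_eq_getElem?_getD, List.getElem?_eq_getElem h, Option.getD_some]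

theorem pv_main (L : Int) (k_pos : List (Int × (Int × Int) × (Int × Int)))
    (hpre : ∀ kv ∈ (PySem.Dict.ofList k_pos).items,
      (kv.2.1.1 ≤ kv.2.2.1 ∧ kv.2.1.2 ≤ kv.2.2.2) →
      (0 ≤ kv.2.1.1 ∧ kv.2.2.1 < L ∧ 0 ≤ kv.2.1.2 ∧ kv.2.2.2 < L)) :
    update_k_board L k_pos = update_k_board_alt L k_pos := by
  have hb0 := pv_shape_init L
  obtain ⟨hsh, hg⟩ := pv_items L ((PySem.Dict.ofList k_pos).items) hpre _ hb0
  have hAfold : update_k_board L k_pos =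
      ((PySem.Dict.ofList k_pos).items).foldl (fun b kv =>
        (PySem.List.pyRange kv.2.1.1 (kv.2.2.1+1) 1).foldl (fun b i =>
          (PySem.List.pyRange kv.2.1.2 (kv.2.2.2+1) 1).foldl (fun b j => pvSetCell b i j kv.1) b) b)
        (List.replicate L.toNat (List.replicate L.toNat 0)) := rfl
  have hshA : pvShape L (update_k_board L k_pos) := by rw [hAfold]; exact hsh
  have hcell : ∀ i0 j0 : Nat, pvGet2 (update_k_board L k_pos) i0 j0 =
      match ((PySem.Dict.ofList k_pos).items).reverse.find? (pvPred i0 j0) with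
      | some kv => kv.1
      | none => 0 := by
    intro i0 j0
    rw [hAfold, hg]
    unfold pvPred
    rcases h : ((PySem.Dict.ofList k_pos).items).reverse.find? (fun kv =>
      decide (kv.2.1.1 ≤ (i0 : Int) ∧ (i0 : Int) ≤ kv.2.2.1 ∧
        kv.2.1.2 ≤ (j0 : Int) ∧ (j0 : Int) ≤ kv.2.2.2)) with _ | kv
    · rw [h]
      exact pv_get2_init L i0 j0
    · rw [h]
  have hsegD : ∀ i0 : Nat,
      (((PySem.Dict.ofList k_pos).items).foldl (fun segs kv => pvBucketRow L kv segs)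
        (List.replicate L.toNat ([] : List (Int × Int × Int)))).getD i0 [] =
      ((((PySem.Dict.ofList k_pos).items).filter (pvQ L i0)).map (pvG L)) := by
    intro i0
    have hacc : (List.replicate L.toNat ([] : List (Int × Int × Int))).getD i0 [] = [] := by
      by_cases h : i0 < L.toNat <;>
        simp [List.getD_eq_getElem?_getD, List.getElem?_replicate, h]
    rw [(pv_bucket_all L i0 ((PySem.Dict.ofList k_pos).items) _ (by simp)).2, hacc,
      List.nil_append]
  have hBlen : (update_k_board_alt L k_pos).length = L.toNat := by
    simp [update_k_board_alt, PySem.List.length_pyRange_one]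
  apply List.ext_getElem
  · rw [hshA.1, hBlen]
  · intro i0 h1 h2
    have hi0 : i0 < L.toNat := by rw [hshA.1] at h1; exact h1
    have hlr : ((update_k_board L k_pos)[i0]'h1).length = L.toNat :=
      hshA.2 _ (List.getElem_mem h1)
    have hBrow : (update_k_board_alt L k_pos)[i0]'h2 =
        (((((PySem.Dict.ofList k_pos).items).foldl (fun segs kv => pvBucketRow L kv segs)
          (List.replicate L.toNat ([] : List (Int × Int × Int)))).getD i0 []).foldl
          (fun row s => pvSplice row s) (List.replicate L.toNat 0)) := by
      simp [update_k_board_alt]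
    rw [hsegD i0] at hBrow
    apply List.ext_getElem
    · rw [hlr, hBrow,
        (pv_rowfold2 L 0 (by omega) _ (pv_segs_inv L i0 _) _ (by simp)).1]
    · intro j0 hj1 hj2
      have hj0 : j0 < L.toNat := by rw [hlr] at hj1; exact hj1
      obtain ⟨hrl, hrg⟩ := pv_rowfold2 L j0 hj0
        ((((PySem.Dict.ofList k_pos).items).filter (pvQ L i0)).map (pvG L))
        (pv_segs_inv L i0 _) (List.replicate L.toNat 0) (by simp)
      have hj2' : j0 < (((((PySem.Dict.ofList k_pos).items).filter (pvQ L i0)).map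
          (pvG L)).foldl (fun row s => pvSplice row s) (List.replicate L.toNat 0)).length := by
        rw [hrl]; exact hj0
      have hBval : ((update_k_board_alt L k_pos)[i0]'h2)[j0]'hj2 =
          (((((PySem.Dict.ofList k_pos).items).filter (pvQ L i0)).map (pvG L)).foldl
            (fun row s => pvSplice row s) (List.replicate L.toNat 0))[j0]'hj2' := by
        simp only [hBrow]
      rw [pv_get2_eq _ _ _ h1 hj1, hcell i0 j0, hBval, ← pv_getD_elem _ _ hj2', hrg,
        pv_find_eq L i0 j0 hi0 hj0]
      rcases h : ((PySem.Dict.ofList k_pos).items).reverse.find? (pvPred i0 j0) with _ | kv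
      · exact (List.getD_replicate _ hj0).symm
      · rfl

-- ===== VERDICT (by name: the statement is the Claim_ definition above) =====
theorem update_k_board_spec : Claim_equal_update_k_board := by
  intro L k_pos _ hpre
  unfold Pre_update_k_board at hpre
  exact pv_main L k_pos hpre
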